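-- pv_equiv track=rewrite | github.com/pypi-data/pypi-mirror-402 | packages/pepkit/pepkit-0.0.5-py3-none-any.whl/pepkit/gen/assembler.py | _pair_sulfurs
-- ===== SOURCE A (Python) =====
-- from typing import List, Optional, Tuple
--
-- def _pair_sulfurs(sulfur_indices: List[int], max_pairs: int) -> List[Tuple[int, int]]:
--     """
--     Greedily pair sulfur indices into disulfide pairs.
--
--     :param sulfur_indices: List of sulfur atom indices.
--     :param max_pairs: Maximum number of pairs to produce.
--     :returns: List of (i, j) index pairs.
--     """
--     pairs: List[Tuple[int, int]] = []
--     used = set()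
--     for i, si in enumerate(sulfur_indices):
--         if si in used:
--             continue
--         for sj in sulfur_indices[i + 1 :]:  # noqa
--             if sj in used:
--                 continue
--             pairs.append((si, sj))
--             used.add(si)
--             used.add(sj)
--             break
--         if len(pairs) >= max_pairs:
--             break
--     return pairs
-- ===== SOURCE B (Python) =====
-- from typing import List, Optional, Tuple
--
-- def _pair_sulfurs(sulfur_indices: List[int], max_pairs: int) -> List[Tuple[int, int]]:
--     """One linear pass: keep the first unpaired unused value as `pending`
--     and pair it with the next unused value seen."""
--     pairs: List[Tuple[int, int]] = []
--     used = set()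
--     pending: Optional[int] = None
--     for v in sulfur_indices:
--         if v in used:
--             continue
--         if pending is None:
--             pending = v
--         else:
--             pairs.append((pending, v))
--             used.add(pending)
--             used.add(v)
--             pending = None
--             if len(pairs) >= max_pairs:
--                 break
--     return pairs
-- ===== Notes on version B (the rewrite author's own statement) =====
-- stated objective: faster
-- what changed: Replaces the nested outer loop + inner rescan of the tail with a single linear pass that carries a `pending` unpaired value and the used-value set, pairing pending with the next unused value.
import Mathlib
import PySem

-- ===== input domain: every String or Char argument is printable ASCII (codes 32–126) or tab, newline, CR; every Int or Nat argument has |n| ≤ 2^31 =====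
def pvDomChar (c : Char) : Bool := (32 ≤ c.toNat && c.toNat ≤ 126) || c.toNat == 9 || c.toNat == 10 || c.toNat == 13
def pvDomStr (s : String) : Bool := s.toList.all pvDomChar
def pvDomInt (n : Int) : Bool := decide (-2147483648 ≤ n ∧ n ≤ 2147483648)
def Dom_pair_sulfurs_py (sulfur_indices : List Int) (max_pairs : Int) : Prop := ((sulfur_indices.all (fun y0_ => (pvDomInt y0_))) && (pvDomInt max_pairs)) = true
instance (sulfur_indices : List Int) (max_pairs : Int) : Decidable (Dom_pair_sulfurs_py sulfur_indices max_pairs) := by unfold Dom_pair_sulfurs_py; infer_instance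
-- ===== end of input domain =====

-- B replaces A's nested outer-loop-plus-tail-rescan with a single pass carrying a pending unpaired value (alternative decomposition).
-- ===== PORT A =====
-- inner 'for sj in sulfur_indices[i+1:]': skip used sj, else append the pair, mark both used, break
def pairAInner (si : Int) (rest : List Int) (pairs : List (Int × Int))
    (used : PySem.Set Int) : List (Int × Int) × PySem.Set Int :=
  match rest with
  | [] => (pairs, used)
  | sj :: rest' =>
    if PySem.Set.contains used sj then pairAInner si rest' pairs used
    else (pairs ++ [(si, sj)], PySem.Set.add (PySem.Set.add used si) sj)

-- outer 'for i, si in enumerate(sulfur_indices)': the tail of the cons IS sulfur_indices[i+1:]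
def pairAOuter (rest : List Int) (pairs : List (Int × Int)) (used : PySem.Set Int)
    (max_pairs : Int) : List (Int × Int) :=
  match rest with
  | [] => pairs
  | si :: tail =>
    if PySem.Set.contains used si then pairAOuter tail pairs used max_pairs
    else
      let r := pairAInner si tail pairs used
      if (r.1.length : Int) ≥ max_pairs then r.1
      else pairAOuter tail r.1 r.2 max_pairs

def pair_sulfurs_py (sulfur_indices : List Int) (max_pairs : Int) : List (Int × Int) :=
  pairAOuter sulfur_indices [] PySem.Set.empty max_pairs

-- ===== PORT B =====
-- single pass: skip used values; hold the first unpaired value as `pending`, pair it with the next unused one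
def pairBLoop (rest : List Int) (pending : Option Int) (pairs : List (Int × Int))
    (used : PySem.Set Int) (max_pairs : Int) : List (Int × Int) :=
  match rest with
  | [] => pairs
  | v :: rest' =>
    if PySem.Set.contains used v then pairBLoop rest' pending pairs used max_pairs
    else
      match pending with
      | none => pairBLoop rest' (some v) pairs used max_pairs
      | some p =>
        let pairs' := pairs ++ [(p, v)]
        let used' := PySem.Set.add (PySem.Set.add used p) v
        if (pairs'.length : Int) ≥ max_pairs then pairs'
        else pairBLoop rest' none pairs' used' max_pairs

def pair_sulfurs_py_alt (sulfur_indices : List Int) (max_pairs : Int) : List (Int × Int) :=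
  pairBLoop sulfur_indices none [] PySem.Set.empty max_pairs

-- ===== PRECONDITION & SPEC =====
def Spec_pair_sulfurs_py (sulfur_indices : List Int) (max_pairs : Int) (out : List (Int × Int)) : Prop := out = pair_sulfurs_py_alt sulfur_indices max_pairs
instance (sulfur_indices : List Int) (max_pairs : Int) (out : List (Int × Int)) : Decidable (Spec_pair_sulfurs_py sulfur_indices max_pairs out) := by unfold Spec_pair_sulfurs_py; infer_instance

-- ===== CLAIM (what is proved, stated in full; the proofs are below) =====
def Claim_equal_pair_sulfurs_py : Prop := ∀ (sulfur_indices : List Int) (max_pairs : Int), Dom_pair_sulfurs_py sulfur_indices max_pairs → Spec_pair_sulfurs_py sulfur_indices max_pairs (pair_sulfurs_py sulfur_indices max_pairs)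

-- ===== LEMMAS AND PROOFS =====

-- the inner loop only grows the used set
theorem pairAInner_used_mono (si : Int) (rest : List Int) (pairs : List (Int × Int))
    (used : PySem.Set Int) (x : Int) (h : x ∈ used) :
    x ∈ (pairAInner si rest pairs used).2 := by
  induction rest generalizing pairs used with
  | nil => simpa [pairAInner] using h
  | cons sj rest' ih =>
    by_cases hj : sj ∈ used
    · simpa [pairAInner, hj] using ih pairs used h
    · simp [pairAInner, hj, PySem.Set.mem_add, h]

-- after the inner loop pairs si with sj, A's outer loop re-walks the tail but skips
-- every element up to and including sj (they are all used); B continues right after sj.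
-- The bridge lemma: A's post-inner continuation equals B's pending-state scan.
theorem bridge (tail : List Int) (si : Int) (pairs : List (Int × Int))
    (used : PySem.Set Int) (max_pairs : Int)
    (hsi : si ∉ used)
    (hmain : ∀ rest', rest'.length ≤ tail.length → ∀ pairs' used',
      pairAOuter rest' pairs' used' max_pairs = pairBLoop rest' none pairs' used' max_pairs) :
    (if ((pairAInner si tail pairs used).1.length : Int) ≥ max_pairs
       then (pairAInner si tail pairs used).1
       else pairAOuter tail (pairAInner si tail pairs used).1 (pairAInner si tail pairs used).2 max_pairs)
    = pairBLoop tail (some si) pairs used max_pairs := by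
  induction tail generalizing pairs used with
  | nil =>
    simp only [pairAInner, pairBLoop, pairAOuter]
    split <;> rfl
  | cons sj tail' ih =>
    by_cases hj : sj ∈ used
    · -- sj already used: both loops skip it
      have hrec := ih pairs used hsi
        (fun rest' hl pairs' used' => hmain rest' (Nat.le_succ_of_le hl) pairs' used')
      rcases h' : pairAInner si tail' pairs used with ⟨ps, us⟩
      have hjus : sj ∈ us := by
        have := pairAInner_used_mono si tail' pairs used sj hj
        rwa [h'] at this
      simp only [h'] at hrec
      by_cases hge : (ps.length : Int) ≥ max_pairs
      · simpa [pairAInner, pairBLoop, hj, h', hge] using hrec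
      · simpa [pairAInner, pairBLoop, pairAOuter, hj, h', hge, hjus] using hrec
    · -- sj unused: the pair (si, sj) is formed by both
      have hjus : sj ∈ PySem.Set.add (PySem.Set.add used si) sj := by
        simp [PySem.Set.mem_add]
      have hmain' := hmain tail' (Nat.le_succ _)
        (pairs ++ [(si, sj)]) (PySem.Set.add (PySem.Set.add used si) sj)
      simp [pairAInner, pairBLoop, hj]
      split_ifs
      · rfl
      · -- both continue on tail'; A first re-visits sj and skips it
        simp [pairAOuter, hjus, hmain']

-- main equivalence, by strong induction on the length of the remaining list
theorem main_eq : ∀ (n : Nat) (rest : List Int), rest.length ≤ n →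
    ∀ (pairs : List (Int × Int)) (used : PySem.Set Int) (max_pairs : Int),
    pairAOuter rest pairs used max_pairs = pairBLoop rest none pairs used max_pairs := by
  intro n
  induction n with
  | zero =>
    intro rest hl pairs used max_pairs
    match rest with
    | [] => rfl
  | succ n ih =>
    intro rest hl pairs used max_pairs
    match rest with
    | [] => rfl
    | si :: tail =>
      by_cases hsi : si ∈ used
      · simp only [pairAOuter, pairBLoop]
        rw [if_pos (by simpa [PySem.Set.contains_iff] using hsi),
            if_pos (by simpa [PySem.Set.contains_iff] using hsi)]
        exact ih tail (by simpa using Nat.le_of_succ_le_succ hl) pairs used max_pairs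
      · have htail : tail.length ≤ n := by simpa using Nat.le_of_succ_le_succ hl
        have hb := bridge tail si pairs used max_pairs hsi
          (fun rest' hl' pairs' used' => ih rest' (le_trans hl' htail) pairs' used' max_pairs)
        simpa [pairAOuter, pairBLoop, hsi] using hb

-- ===== VERDICT (by name: the statement is the Claim_ definition above) =====
theorem pair_sulfurs_py_spec : Claim_equal_pair_sulfurs_py := by
  intro sulfur_indices max_pairs _
  unfold Spec_pair_sulfurs_py pair_sulfurs_py pair_sulfurs_py_alt
  exact main_eq sulfur_indices.length sulfur_indices le_rfl [] PySem.Set.empty max_pairs
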